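-- pv_equiv track=rewrite | github.com/Kartik180/Trading_engine | learn/one.py | calculate_team_probabilities
-- ===== SOURCE A (Python) =====
-- def calculate_probability():
--     return 0.5
--
-- def calculate_team_probabilities(teams, fixtures):
--     team_probabilities = {}
--     for team in teams:
--         team_probabilities[team] = 0
--
--     for match in fixtures:
--         team1 = match[0]
--         team2 = match[1]
--
--         # Calculate the probability of team1 winning the match
--         probability = calculate_probability()
--
--         # Update the team probabilities based on the match result
--         if probability >= 0.5:
--             team_probabilities[team1] += 2
--         else:
--             team_probabilities[team2] += 2
--
--     return team_probabilities
-- ===== SOURCE B (Python) =====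
-- def calculate_team_probabilities(teams, fixtures):
--     # Two-pass: tally winners first, then apply 2 points per win in one sweep.
--     tally = {}
--     for match in fixtures:
--         tally[match[0]] = tally.get(match[0], 0) + 1
--     result = {team: 0 for team in teams}
--     for team, count in tally.items():
--         result[team] += 2 * count
--     return result
-- ===== Notes on version B (the rewrite author's own statement) =====
-- stated objective: simpler
-- what changed: B drops the dead else-branch and coin-flip helper (probability is the constant 0.5, so team1 always gets the points) and replaces the per-fixture dict updates by a two-pass tally: count wins per team first, then add 2*count once per distinct team.
import Mathlib
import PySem

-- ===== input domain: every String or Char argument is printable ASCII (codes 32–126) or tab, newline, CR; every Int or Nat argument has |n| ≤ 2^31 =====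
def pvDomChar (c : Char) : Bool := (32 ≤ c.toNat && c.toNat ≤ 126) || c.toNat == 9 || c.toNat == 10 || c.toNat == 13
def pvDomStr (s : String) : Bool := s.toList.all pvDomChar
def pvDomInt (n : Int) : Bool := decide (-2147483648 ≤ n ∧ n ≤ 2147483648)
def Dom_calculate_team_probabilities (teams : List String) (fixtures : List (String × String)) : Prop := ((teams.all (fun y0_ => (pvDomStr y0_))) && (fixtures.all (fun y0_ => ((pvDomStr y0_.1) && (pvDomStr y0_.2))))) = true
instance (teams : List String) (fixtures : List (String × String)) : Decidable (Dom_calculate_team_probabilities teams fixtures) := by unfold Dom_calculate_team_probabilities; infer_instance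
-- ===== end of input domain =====

-- B tallies wins per team in one dict pass and then applies 2*count per distinct team,
-- instead of A's per-fixture update with a dead coin-flip branch; objective: simpler.


-- ===== PORT A =====
-- Python's constant float 0.5 is exactly representable; ported as the rational 1/2 (exact)
def calculate_probability : ℚ := 1/2

def calculate_team_probabilities (teams : List String) (fixtures : List (String × String)) : List (String × Int) :=
  let team_probabilities : PySem.Dict String Int :=
    teams.foldl (fun d team => d.insert team 0) PySem.Dict.empty
  let team_probabilities :=
    fixtures.foldl (fun d mtch =>
      let team1 := mtch.1
      let team2 := mtch.2
      let probability := calculate_probability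
      if probability ≥ 1/2 then
        d.modify team1 0 (· + 2)   -- d[team1] += 2; KeyError (missing key) excluded by Pre_
      else
        d.modify team2 0 (· + 2)   -- d[team2] += 2; same remark
      ) team_probabilities
  team_probabilities.items

-- ===== PORT B =====
def calculate_team_probabilities_alt (teams : List String) (fixtures : List (String × String)) : List (String × Int) :=
  let tally : PySem.Dict String Int :=
    fixtures.foldl (fun d mtch => d.insert mtch.1 (d.getD mtch.1 0 + 1)) PySem.Dict.empty
  let result : PySem.Dict String Int :=
    teams.foldl (fun d team => d.insert team 0) PySem.Dict.empty
  let result :=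
    tally.items.foldl (fun r p => r.modify p.1 0 (· + 2 * p.2)) result
      -- result[team] += 2*count; KeyError (missing key) excluded by Pre_
  result.items

-- ===== PRECONDITION & SPEC =====
-- Pre_ excludes exactly the inputs where some fixture's first team is not in teams:
-- there Python A raises KeyError (and Python B raises KeyError too).
def Pre_calculate_team_probabilities (teams : List String) (fixtures : List (String × String)) : Prop :=
  ∀ m ∈ fixtures, m.1 ∈ teams
instance (teams : List String) (fixtures : List (String × String)) : Decidable (Pre_calculate_team_probabilities teams fixtures) := by unfold Pre_calculate_team_probabilities; infer_instance

def pvWitness_calculate_team_probabilities : List String × (List (String × String)) :=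
  (["a", "b"], [("a", "b"), ("b", "a"), ("a", "b")])

def Spec_calculate_team_probabilities (teams : List String) (fixtures : List (String × String)) (out : List (String × Int)) : Prop := out = calculate_team_probabilities_alt teams fixtures
instance (teams : List String) (fixtures : List (String × String)) (out : List (String × Int)) : Decidable (Spec_calculate_team_probabilities teams fixtures out) := by unfold Spec_calculate_team_probabilities; infer_instance

-- ===== CLAIM (what is proved, stated in full; the proofs are below) =====
def Claim_equal_calculate_team_probabilities : Prop := ∀ (teams : List String) (fixtures : List (String × String)), Dom_calculate_team_probabilities teams fixtures → Pre_calculate_team_probabilities teams fixtures → Spec_calculate_team_probabilities teams fixtures (calculate_team_probabilities teams fixtures)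

-- ===== LEMMAS AND PROOFS =====

-- A's update loop: each key's value grows by 2 per occurrence of the key among first components.
theorem a_loop_getD (l : List (String × String)) (d : PySem.Dict String Int) (v : String) :
    (l.foldl (fun d m => d.modify m.1 0 (· + 2)) d).getD v 0
      = d.getD v 0 + 2 * ((l.map Prod.fst).count v : Int) := by
  induction l generalizing d with
  | nil => simp
  | cons m l ih =>
      simp only [List.foldl_cons, ih, List.map_cons, List.count_cons]
      rw [PySem.Dict.getD_modify]
      by_cases h : v = m.1
      · simp [h]; ring
      · have h' : ¬ m.1 = v := fun hh => h hh.symm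
        simp [h, h']

-- B's apply loop: each key's value grows by twice the summed counts stored under that key.
theorem b_loop_getD (ps : List (String × Int)) (d : PySem.Dict String Int) (v : String) :
    (ps.foldl (fun r p => r.modify p.1 0 (· + 2 * p.2)) d).getD v 0
      = d.getD v 0 + 2 * ((ps.filter (fun p => p.1 == v)).map (·.2)).sum := by
  induction ps generalizing d with
  | nil => simp
  | cons p ps ih =>
      simp only [List.foldl_cons, ih, List.filter_cons]
      rw [PySem.Dict.getD_modify]
      by_cases h : v = p.1
      · simp [h]; ring
      · have h' : ¬ p.1 = v := fun hh => h hh.symm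
        simp [h, h']

-- on a duplicate-free list, filtering for one element keeps at most one copy
theorem filter_beq_nodup {l : List String} (hnd : l.Nodup) (v : String) :
    l.filter (· == v) = if v ∈ l then [v] else [] := by
  rw [List.filter_beq]
  by_cases h : v ∈ l
  · simp [h, List.count_eq_one_of_mem hnd h]
  · simp [h, List.count_eq_zero_of_not_mem h]

-- the main equivalence: both dicts have d0's keys, and value 2 * (wins of the key) at each key
theorem main_eq (teams : List String) (fixtures : List (String × String))
    (hpre : ∀ m ∈ fixtures, m.1 ∈ teams) :
    calculate_team_probabilities teams fixtures = calculate_team_probabilities_alt teams fixtures := by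
  simp only [calculate_team_probabilities, calculate_team_probabilities_alt,
    calculate_probability, ge_iff_le, le_refl, if_true]
  set d0 : PySem.Dict String Int := teams.foldl (fun d t => d.insert t 0) PySem.Dict.empty with hd0
  set f : List String := fixtures.map Prod.fst with hf
  have hkeys0 : d0.keys = PySem.Set.ofList teams := by
    rw [hd0, PySem.Dict.keys_foldl_insert, PySem.Dict.keys_empty, PySem.Set.update_nil_left]
  have hnd0 : d0.keys.Nodup := by rw [hkeys0]; exact PySem.Set.nodup_ofList teams
  have hsub : ∀ y ∈ f, PySem.Set.contains d0.keys y = true := by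
    intro y hy
    rw [hf] at hy
    obtain ⟨m, hm, rfl⟩ := List.mem_map.mp hy
    rw [PySem.Set.contains_iff, hkeys0]
    exact (PySem.Set.mem_ofList teams m.1).mpr (hpre m hm)
  set dA : PySem.Dict String Int := fixtures.foldl (fun d m => d.modify m.1 0 (· + 2)) d0 with hdA
  set tally : PySem.Dict String Int :=
    fixtures.foldl (fun d m => d.insert m.1 (d.getD m.1 0 + 1)) PySem.Dict.empty with htallydef
  set dB : PySem.Dict String Int := tally.items.foldl (fun r p => r.modify p.1 0 (· + 2 * p.2)) d0 with hdB
  have htally : tally = PySem.Dict.counter f := by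
    rw [htallydef, hf, ← PySem.Dict.foldl_insert_getD_add_one_eq_counter, List.foldl_map]
  have hAkeys : dA.keys = d0.keys := by
    rw [hdA, PySem.Dict.keys_foldl_modify_key, PySem.Set.update_eq_append_filter]
    rw [← hf]
    have hnil : (PySem.Set.ofList f).filter
        (fun y => !(PySem.Set.contains d0.keys y)) = [] := by
      rw [List.filter_eq_nil_iff]
      intro y hy
      have hyf := (PySem.Set.mem_ofList f y).mp hy
      simp
      exact (PySem.Set.contains_iff d0.keys y).mp (hsub y hyf)
    rw [hnil, List.append_nil]
  have hBkeys : dB.keys = d0.keys := by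
    rw [hdB, PySem.Dict.keys_foldl_modify_key, PySem.Set.update_eq_append_filter]
    have hkeys : tally.items.map Prod.fst = PySem.Set.ofList f := by
      rw [htally]; exact PySem.Dict.keys_counter f
    rw [hkeys]
    have hnil : (PySem.Set.ofList (PySem.Set.ofList f)).filter
        (fun y => !(PySem.Set.contains d0.keys y)) = [] := by
      rw [List.filter_eq_nil_iff]
      intro y hy
      have hyf : y ∈ f :=
        (PySem.Set.mem_ofList f y).mp ((PySem.Set.mem_ofList (PySem.Set.ofList f) y).mp hy)
      simp
      exact (PySem.Set.contains_iff d0.keys y).mp (hsub y hyf)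
    rw [hnil, List.append_nil]
  have hA : ∀ v, dA.getD v 0 = d0.getD v 0 + 2 * (f.count v : Int) := by
    intro v; rw [hdA, a_loop_getD, hf]
  have hB : ∀ v, dB.getD v 0 = d0.getD v 0 + 2 * (f.count v : Int) := by
    intro v
    rw [hdB, b_loop_getD]
    congr 1
    have hitems : tally.items
        = (PySem.Set.ofList f).map (fun k => (k, (List.count k f : Int))) := by
      rw [htally]; exact PySem.Dict.items_counter f
    rw [hitems, List.filter_map]
    show 2 * ((((PySem.Set.ofList f).filter (fun k => k == v)).map
        (fun k => ((k : String), (List.count k f : Int)))).map (·.2)).sum = _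
    rw [filter_beq_nodup (PySem.Set.nodup_ofList f) v]
    by_cases h : v ∈ PySem.Set.ofList f
    · simp [h]
    · have hvf : v ∉ f := fun hh => h ((PySem.Set.mem_ofList f v).mpr hh)
      simp [h, List.count_eq_zero_of_not_mem hvf]
  have hndA : dA.keys.Nodup := by rw [hAkeys]; exact hnd0
  have hndB : dB.keys.Nodup := by rw [hBkeys]; exact hnd0
  rw [PySem.Dict.items_eq_map_keys dA hndA 0, PySem.Dict.items_eq_map_keys dB hndB 0,
    hAkeys, hBkeys]
  apply List.map_congr_left
  intro k _
  simp [hA k, hB k]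

-- ===== VERDICT (by name: the statement is the Claim_ definition above) =====
theorem calculate_team_probabilities_spec : Claim_equal_calculate_team_probabilities := by
  intro teams fixtures _ hpre
  exact main_eq teams fixtures hpre
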